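-- pv_equiv track=rewrite | github.com/arnav10goel/IP-Assignments | A2_2021519/A2_2021519_5/A2_2021519_5.py | notes
-- ===== SOURCE A (Python) =====
-- music_ref = ['C', 'C#', 'D', 'D#', 'E', 'F', 'F#', 'G', 'G#', 'A', 'A#', 'B']
--
-- def notes(root_note):
--     lst = []
--     for i in range(len(music_ref)):
--         if music_ref[i] >= root_note:
--             lst.append(music_ref[i])
--     for j in music_ref:
--         if j not in lst:
--             lst.append(j)
--     lst.append(root_note + "'")
--     return lst
-- ===== SOURCE B (Python) =====
-- music_ref = ['C', 'C#', 'D', 'D#', 'E', 'F', 'F#', 'G', 'G#', 'A', 'A#', 'B']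
--
-- def notes(root_note):
--     geq, lt = [], []
--     for n in music_ref:
--         (geq if n >= root_note else lt).append(n)
--     return geq + lt + [root_note + "'"]
-- ===== Notes on version B (the rewrite author's own statement) =====
-- stated objective: simpler
-- what changed: Single-pass partition of music_ref into n >= root_note and n < root_note lists (then concatenated), replacing A's two passes where the second rescans the accumulated list with a membership test.
import Mathlib
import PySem

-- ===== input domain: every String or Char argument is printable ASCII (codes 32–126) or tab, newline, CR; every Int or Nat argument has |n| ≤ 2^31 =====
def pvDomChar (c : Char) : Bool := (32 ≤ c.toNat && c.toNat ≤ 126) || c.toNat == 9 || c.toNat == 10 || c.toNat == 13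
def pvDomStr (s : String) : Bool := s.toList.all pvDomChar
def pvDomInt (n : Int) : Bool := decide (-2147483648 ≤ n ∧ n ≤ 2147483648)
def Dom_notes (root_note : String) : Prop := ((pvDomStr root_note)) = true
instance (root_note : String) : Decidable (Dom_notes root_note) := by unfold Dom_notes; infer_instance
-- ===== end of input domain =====

-- B replaces A's two passes (filter, then membership-test rescan) by one single-pass
-- partition of music_ref on n >= root_note; objective: simpler.

def music_ref : List String :=
  ["C", "C#", "D", "D#", "E", "F", "F#", "G", "G#", "A", "A#", "B"]

-- ===== PORT A =====
-- music_ref[i] is always in range in A's first loop, so pyGetD with a dummy default is exact.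
def notes (root_note : String) : List String :=
  let lst : List String := []
  let lst := (PySem.List.pyRange 0 (music_ref.length : Int) 1).foldl
    (fun lst i =>
      if root_note ≤ PySem.List.pyGetD music_ref i "" then
        lst ++ [PySem.List.pyGetD music_ref i ""]
      else lst) lst
  let lst := music_ref.foldl (fun lst j => if j ∈ lst then lst else lst ++ [j]) lst
  lst ++ [root_note ++ "'"]

-- ===== PORT B =====
def notes_alt (root_note : String) : List String :=
  let p := music_ref.foldl
    (fun (p : List String × List String) n =>
      if root_note ≤ n then (p.1 ++ [n], p.2) else (p.1, p.2 ++ [n]))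
    ([], [])
  p.1 ++ p.2 ++ [root_note ++ "'"]

-- ===== PRECONDITION & SPEC =====
def Spec_notes (root_note : String) (out : List String) : Prop := out = notes_alt root_note
instance (root_note : String) (out : List String) : Decidable (Spec_notes root_note out) := by unfold Spec_notes; infer_instance

-- ===== CLAIM (what is proved, stated in full; the proofs are below) =====
def Claim_equal_notes : Prop := ∀ (root_note : String), Dom_notes root_note → Spec_notes root_note (notes root_note)

-- ===== LEMMAS AND PROOFS =====

-- A's first loop is the filter of music_ref by (root_note ≤ ·).
theorem notesA_loop1 (r : String) :
    (PySem.List.pyRange 0 (music_ref.length : Int) 1).foldl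
      (fun lst i =>
        if r ≤ PySem.List.pyGetD music_ref i "" then
          lst ++ [PySem.List.pyGetD music_ref i ""]
        else lst) [] = music_ref.filter (fun x => decide (r ≤ x)) := by
  have h := List.foldl_map (f := fun i => PySem.List.pyGetD music_ref i "")
    (g := fun (lst : List String) x => if r ≤ x then lst ++ [x] else lst)
    (l := PySem.List.pyRange 0 (music_ref.length : Int) 1) (init := [])
  rw [← h, show ((music_ref.length : Int)) = PySem.List.len music_ref from rfl,
      PySem.List.map_pyGetD_pyRange_zero,
      PySem.List.foldl_append_ite_eq_filter]
  simp

-- A's second loop: dedup-appending over a Nodup list onto an accumulator that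
-- contains exactly the elements satisfying p appends exactly the others, in order.
theorem dedup_append_fold {α : Type} [DecidableEq α] (p : α → Bool) :
    ∀ (xs : List α) (acc : List α), xs.Nodup →
      (∀ x ∈ xs, (x ∈ acc ↔ p x = true)) →
      xs.foldl (fun lst j => if j ∈ lst then lst else lst ++ [j]) acc
        = acc ++ xs.filter (fun x => !p x)
  | [], acc, _, _ => by simp
  | x :: xs, acc, hnd, hmem => by
    simp only [List.nodup_cons] at hnd
    by_cases hx : p x = true
    · have hxin : x ∈ acc := (hmem x (by simp)).2 hx
      simp only [List.foldl_cons, if_pos hxin, List.filter_cons, hx]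
      simpa using dedup_append_fold p xs acc hnd.2
        (fun y hy => hmem y (by simp [hy]))
    · have hxout : x ∉ acc := fun h => hx ((hmem x (by simp)).1 h)
      simp only [List.foldl_cons, if_neg hxout, List.filter_cons, hx]
      rw [dedup_append_fold p xs (acc ++ [x]) hnd.2
        (fun y hy => by
          have hne : y ≠ x := fun h => hnd.1 (h ▸ hy)
          simp [hmem y (by simp [hy]), hne])]
      simp

-- B's fold partitions music_ref into the ≥ and < parts.
theorem partition_fold (r : String) :
    ∀ (xs : List String) (a b : List String),
      xs.foldl
        (fun (p : List String × List String) n =>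
          if r ≤ n then (p.1 ++ [n], p.2) else (p.1, p.2 ++ [n])) (a, b)
        = (a ++ xs.filter (fun x => decide (r ≤ x)),
           b ++ xs.filter (fun x => !decide (r ≤ x)))
  | [], a, b => by simp
  | x :: xs, a, b => by
    simp only [List.foldl_cons]
    by_cases hx : r ≤ x
    · rw [if_pos hx, partition_fold r xs (a ++ [x]) b]
      have hx' : r.toList ≤ x.toList := by simpa [String.le_iff_toList_le] using hx
      simp [hx']
    · rw [if_neg hx, partition_fold r xs a (b ++ [x])]
      have hx' : x.toList < r.toList := by
        rw [← String.lt_iff_toList_lt]; exact not_le.mp hx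
      simp [not_le.mpr hx']

theorem music_ref_nodup : music_ref.Nodup := by decide

-- ===== VERDICT (by name: the statement is the Claim_ definition above) =====
theorem notes_spec : Claim_equal_notes := by
  intro r _
  unfold Spec_notes notes notes_alt
  dsimp only
  rw [notesA_loop1 r, partition_fold r music_ref [] []]
  rw [dedup_append_fold (fun x => decide (r ≤ x)) music_ref
        (music_ref.filter (fun x => decide (r ≤ x))) music_ref_nodup
        (fun x hx => by simp [List.mem_filter, hx])]
  simp
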